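-- pv_equiv track=rewrite | github.com/lucasiragusa/landingpermit_app | src/lib/serialize_flights.py | format_dow_string
-- ===== SOURCE A (Python) =====
-- def format_dow_string (dow_string):
--     """
--     Formats a string representing days of the week into a standardized dot notation.
--
--     Args:
--         dow_string (str): A string containing numbers representing days of the week.
--
--     Returns:
--         str: A formatted string where each number represents a day of the week and dots represent days without flights.
--
--     Example:
--         Input: '135'
--         Output: '1.3.5..'
--     """
--     result = ''
--
--     for i in range (1,8):
--         if str(i) in dow_string:
--             result += str(i)
--         else:
--             result += '.'
--
--     return result
-- ===== SOURCE B (Python) =====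
-- def format_dow_string(dow_string):
--     """Scatter-write re-implementation: fill a seven-slot dot template by one pass over the input."""
--     out = ['.'] * 7
--     for c in dow_string:
--         if c in '1234567':
--             out[int(c) - 1] = c
--     return ''.join(out)
-- ===== Notes on version B (the rewrite author's own statement) =====
-- stated objective: alternative
-- what changed: Instead of scanning the 1..7 range and doing a substring-membership test in the input for each day, B makes a single pass over the input string and scatter-writes each day digit into its slot of a precomputed 7-slot dot template.
import Mathlib
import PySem

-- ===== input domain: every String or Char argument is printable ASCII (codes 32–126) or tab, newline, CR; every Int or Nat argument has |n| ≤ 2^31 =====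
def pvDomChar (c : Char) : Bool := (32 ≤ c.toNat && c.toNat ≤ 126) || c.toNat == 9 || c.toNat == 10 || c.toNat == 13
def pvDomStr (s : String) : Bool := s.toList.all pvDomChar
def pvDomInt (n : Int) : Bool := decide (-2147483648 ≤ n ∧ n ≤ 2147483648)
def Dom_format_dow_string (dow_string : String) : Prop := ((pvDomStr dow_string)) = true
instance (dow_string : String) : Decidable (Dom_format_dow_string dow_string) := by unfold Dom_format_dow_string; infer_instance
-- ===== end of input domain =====

-- B rewrites A's range(1,8)+membership scan as a single scatter-write pass over the input; return values proved equal on all inputs.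

-- ===== PORT A =====
-- literal port: for i in range(1,8): result += str(i) if str(i) in dow_string else '.'
def format_dow_string (dow_string : String) : String :=
  String.ofList
    ((PySem.List.pyRange 1 8 1).foldl
      (fun result i =>
        if PySem.Chars.isIn (PySem.Int.toChars i) dow_string.toList = true then
          result ++ PySem.Int.toChars i
        else
          result ++ ['.'])
      [])

-- ===== PORT B =====
-- literal port of Source B: out = ['.']*7; for c in s: if c in '1234567': out[int(c)-1] = c
-- (int(c) - 1 = c.toNat - 49 exactly on the digit characters '1'..'7' the branch admits)
def format_dow_string_alt (dow_string : String) : String :=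
  String.ofList
    (dow_string.toList.foldl
      (fun out c =>
        if PySem.Chars.isIn [c] ['1','2','3','4','5','6','7'] = true then
          out.set (c.toNat - 49) c
        else
          out)
      (List.replicate 7 '.'))

-- ===== PRECONDITION & SPEC =====
def Spec_format_dow_string (dow_string : String) (out : String) : Prop := out = format_dow_string_alt dow_string
instance (dow_string : String) (out : String) : Decidable (Spec_format_dow_string dow_string out) := by unfold Spec_format_dow_string; infer_instance

-- ===== CLAIM (what is proved, stated in full; the proofs are below) =====
def Claim_equal_format_dow_string : Prop := ∀ (dow_string : String), Dom_format_dow_string dow_string → Spec_format_dow_string dow_string (format_dow_string dow_string)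

-- ===== LEMMAS AND PROOFS =====

-- membership of a single char as substring containment
theorem isIn_singleton (c : Char) (l : List Char) :
    PySem.Chars.isIn [c] l = true ↔ c ∈ l := by
  rw [PySem.Chars.isIn_iff_infix]
  constructor
  · intro h; exact h.mem (List.mem_singleton_self c)
  · intro h
    obtain ⟨t1, t2, rfl⟩ := List.append_of_mem h
    exact ⟨t1, t2, by simp⟩

-- B's loop body, named so the scatter lemmas below can speak about it
def pvStep (out : List Char) (c : Char) : List Char :=
  if PySem.Chars.isIn [c] ['1','2','3','4','5','6','7'] = true then out.set (c.toNat - 49) c else out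

theorem pvStep_length (out : List Char) (c : Char) : (pvStep out c).length = out.length := by
  unfold pvStep; split <;> simp

theorem scatter_length (cs : List Char) (out : List Char) :
    (cs.foldl pvStep out).length = out.length := by
  induction cs generalizing out with
  | nil => rfl
  | cons c cs ih => simp [List.foldl, ih, pvStep_length]

-- distinct day digits occupy distinct slots
theorem digit_slot_ne : ∀ c ∈ (['1','2','3','4','5','6','7'] : List Char),
    ∀ c0 ∈ (['1','2','3','4','5','6','7'] : List Char),
    c ≠ c0 → c.toNat - 49 ≠ c0.toNat - 49 := by
  intro c hc c0 hc0 hne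
  fin_cases hc <;> fin_cases hc0 <;> simp_all

theorem digit_slot_lt : ∀ c0 ∈ (['1','2','3','4','5','6','7'] : List Char),
    c0.toNat - 49 < 7 := by
  intro c0 hc0
  fin_cases hc0 <;> decide

-- final value of slot (c0.toNat - 49) for a day digit c0
theorem scatter_get (c0 : Char) (hc0 : c0 ∈ (['1','2','3','4','5','6','7'] : List Char))
    (cs : List Char) (out : List Char) (hlen : out.length = 7) :
    (cs.foldl pvStep out)[c0.toNat - 49]? =
      if c0 ∈ cs then some c0 else out[c0.toNat - 49]? := by
  induction cs generalizing out with
  | nil => simp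
  | cons c cs ih =>
    have hstep : (pvStep out c).length = 7 := by rw [pvStep_length]; exact hlen
    rw [List.foldl_cons, ih (pvStep out c) hstep]
    by_cases hmem : c0 ∈ cs
    · simp [hmem]
    · simp only [hmem, if_false, List.mem_cons, or_false]
      by_cases heq : c0 = c
      · subst heq
        have hidx : c0.toNat - 49 < out.length := by
          rw [hlen]; exact digit_slot_lt c0 hc0
        simp [pvStep, (isIn_singleton c0 _).mpr hc0, hidx]
      · simp only [heq]
        unfold pvStep
        split
        · rename_i hdig
          have hcdig : c ∈ (['1','2','3','4','5','6','7'] : List Char) :=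
            (isIn_singleton c _).mp hdig
          rw [List.getElem?_set_ne (digit_slot_ne c hcdig c0 hc0 (fun h => heq h.symm))]
          simp [Ne.symm heq]
        · simp [Ne.symm heq]

-- ===== VERDICT (by name: the statement is the Claim_ definition above) =====
theorem format_dow_string_spec : Claim_equal_format_dow_string := by
  intro s _
  unfold Spec_format_dow_string format_dow_string format_dow_string_alt
  congr 1
  have hR : PySem.List.pyRange 1 8 1 = [1,2,3,4,5,6,7] := by decide
  rw [hR]
  rw [show (fun (result : List Char) (i : Int) =>
        if PySem.Chars.isIn (PySem.Int.toChars i) s.toList = true then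
          result ++ PySem.Int.toChars i
        else
          result ++ ['.']) =
      (fun (result : List Char) (i : Int) =>
        result ++ (if PySem.Chars.isIn (PySem.Int.toChars i) s.toList = true then
          PySem.Int.toChars i else ['.'])) from
    funext fun result => funext fun i => by split <;> rfl]
  rw [PySem.List.foldl_append_eq_flatMap]
  have hfold :
      s.toList.foldl (fun out c =>
        if PySem.Chars.isIn [c] ['1','2','3','4','5','6','7'] = true then
          out.set (c.toNat - 49) c
        else out) (List.replicate 7 '.') = s.toList.foldl pvStep (List.replicate 7 '.') := rfl
  rw [hfold]
  set L := s.toList.foldl pvStep (List.replicate 7 '.') with hL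
  have hlen : L.length = 7 := by rw [hL, scatter_length]; rfl
  have hget : ∀ c0 ∈ (['1','2','3','4','5','6','7'] : List Char),
      L[c0.toNat - 49]? = if c0 ∈ s.toList then some c0 else some '.' := by
    intro c0 hc0
    rw [hL, scatter_get c0 hc0 s.toList (List.replicate 7 '.') (by rfl)]
    split
    · rfl
    · fin_cases hc0 <;> rfl
  have hLeq : L = ['1','2','3','4','5','6','7'].map (fun d => if d ∈ s.toList then d else '.') := by
    apply List.ext_getElem?
    intro i
    match i with
    | 0 => have h := hget '1' (by simp); rw [show ('1'.toNat - 49) = 0 from rfl] at h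
           rw [h]; simp [apply_ite]
    | 1 => have h := hget '2' (by simp); rw [show ('2'.toNat - 49) = 1 from rfl] at h
           rw [h]; simp [apply_ite]
    | 2 => have h := hget '3' (by simp); rw [show ('3'.toNat - 49) = 2 from rfl] at h
           rw [h]; simp [apply_ite]
    | 3 => have h := hget '4' (by simp); rw [show ('4'.toNat - 49) = 3 from rfl] at h
           rw [h]; simp [apply_ite]
    | 4 => have h := hget '5' (by simp); rw [show ('5'.toNat - 49) = 4 from rfl] at h
           rw [h]; simp [apply_ite]
    | 5 => have h := hget '6' (by simp); rw [show ('6'.toNat - 49) = 5 from rfl] at h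
           rw [h]; simp [apply_ite]
    | 6 => have h := hget '7' (by simp); rw [show ('7'.toNat - 49) = 6 from rfl] at h
           rw [h]; simp [apply_ite]
    | (n+7) =>
      rw [List.getElem?_eq_none (by rw [hlen]; omega),
          List.getElem?_eq_none (by simp only [List.length_map, List.length_cons, List.length_nil]; omega)]
  rw [hLeq]
  simp only [List.flatMap_cons, List.flatMap_nil, List.map_cons, List.map_nil,
    List.append_nil, List.nil_append,
    show PySem.Int.toChars 1 = ['1'] from rfl, show PySem.Int.toChars 2 = ['2'] from rfl,
    show PySem.Int.toChars 3 = ['3'] from rfl, show PySem.Int.toChars 4 = ['4'] from rfl,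
    show PySem.Int.toChars 5 = ['5'] from rfl, show PySem.Int.toChars 6 = ['6'] from rfl,
    show PySem.Int.toChars 7 = ['7'] from rfl, isIn_singleton]
  split_ifs <;> rfl
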